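-- pv_equiv track=rewrite | github.com/Thegreekman76/Molecule | backend/core/middleware/auth.py | is_public_path
-- ===== SOURCE A (Python) =====
-- def is_public_path(path: str) -> bool:
--     """Verificar si la ruta es pública"""
--     public_paths = [
--         "/docs",
--         "/redoc",
--         "/openapi.json",
--         "/api/v1/auth/login",
--         "/api/v1/auth/register",
--         "/health",
--         "/"
--     ]
--     return any(path.startswith(public_path) for public_path in public_paths)
-- ===== SOURCE B (Python) =====
-- def is_public_path(path: str) -> bool:
--     """Verificar si la ruta es pública"""
--     # every public prefix itself starts with "/" and "/" is public,
--     # so the whole disjunction collapses to one test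
--     return path.startswith("/")
-- ===== Notes on version B (the rewrite author's own statement) =====
-- stated objective: simpler
-- what changed: Since '/' is itself in public_paths and every listed prefix begins with '/', the whole any-over-list disjunction collapses to the single test path.startswith('/'); B drops the list and the loop entirely.
import Mathlib
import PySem

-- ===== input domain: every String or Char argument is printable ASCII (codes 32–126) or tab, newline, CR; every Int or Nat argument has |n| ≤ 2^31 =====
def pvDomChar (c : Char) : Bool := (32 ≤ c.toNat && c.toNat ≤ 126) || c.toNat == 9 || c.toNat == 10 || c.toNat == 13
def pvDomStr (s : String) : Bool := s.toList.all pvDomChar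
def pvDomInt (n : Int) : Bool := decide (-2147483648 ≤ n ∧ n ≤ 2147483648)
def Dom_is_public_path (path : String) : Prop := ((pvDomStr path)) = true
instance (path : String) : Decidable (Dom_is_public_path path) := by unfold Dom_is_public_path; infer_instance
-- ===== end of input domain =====

-- ===== PORT A =====
-- A: any(path.startswith(p) for p in public_paths) over the literal list
def is_public_path (path : String) : Bool :=
  let public_paths : List String :=
    ["/docs", "/redoc", "/openapi.json", "/api/v1/auth/login",
     "/api/v1/auth/register", "/health", "/"]
  public_paths.any (fun public_path => PySem.Str.startswith path public_path)

-- ===== PORT B =====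
-- B: single test; '/' is in the list and every listed prefix begins with '/'
def is_public_path_alt (path : String) : Bool :=
  PySem.Str.startswith path "/"

-- ===== PRECONDITION & SPEC =====
def Spec_is_public_path (path : String) (out : Bool) : Prop := out = is_public_path_alt path
instance (path : String) (out : Bool) : Decidable (Spec_is_public_path path out) := by unfold Spec_is_public_path; infer_instance

-- ===== CLAIM (what is proved, stated in full; the proofs are below) =====
def Claim_equal_is_public_path : Prop := ∀ (path : String), Dom_is_public_path path → Spec_is_public_path path (is_public_path path)

-- ===== LEMMAS AND PROOFS =====

-- ===== VERDICT (by name: the statement is the Claim_ definition above) =====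
theorem is_public_path_spec : Claim_equal_is_public_path := by
  intro path _
  unfold Spec_is_public_path is_public_path is_public_path_alt
  simp only [List.any_cons, List.any_nil, Bool.or_false, PySem.Str.startswith_eq]
  cases h : PySem.Chars.startswith path.toList "/".toList with
  | true => simp [h]
  | false =>
    simp only [h, Bool.or_false]
    have hnp : ¬ (['/'] <+: path.toList) := fun hp => by
      have ht := (PySem.Chars.startswith_iff path.toList "/".toList).mpr hp
      rw [h] at ht; cases ht
    have key : ∀ (p : String), ['/'] <+: p.toList →
        PySem.Chars.startswith path.toList p.toList = false := by
      intro p hsub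
      rw [← Bool.not_eq_true]
      intro hc
      exact hnp (hsub.trans ((PySem.Chars.startswith_iff _ _).mp hc))
    rw [key "/docs" (by decide), key "/redoc" (by decide), key "/openapi.json" (by decide),
        key "/api/v1/auth/login" (by decide), key "/api/v1/auth/register" (by decide),
        key "/health" (by decide)]
    simp
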